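-- pv_equiv track=rewrite | github.com/prufs-ai/prufs | clawdbots/orchestrator.py | _route_with_keywords
-- ===== SOURCE A (Python) =====
-- def _route_with_keywords(user_input: str) -> list[dict]:
--     """Simple keyword-based fallback router if Ollama is unavailable."""
--     lower = user_input.lower()
--
--     # Eurovan
--     if any(w in lower for w in ["eurovan", "van", "engine", "gowesty",
--                                  "suspension", "radiator", "subaru swap",
--                                  "cv joint", "t4"]):
--         return [{"agent": "eurovan_engineer", "task": user_input}]
--
--     # PhD / Dissertation
--     if any(w in lower for w in ["dissertation", "thesis", "paper", "literature",
--                                  "citation", "bibtex", "research gap",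
--                                  "related work", "reviewer"]):
--         return [{"agent": "phd_researcher", "task": user_input}]
--
--     # AutoResearch / ML Training
--     if any(w in lower for w in ["autoresearch", "karpathy", "experiment",
--                                  "training run", "hyperparameter", "fine-tune",
--                                  "ablation", "loss curve", "epoch"]):
--         return [{"agent": "autoresearch_trainer", "task": user_input}]
--
--     # Coding
--     if any(w in lower for w in ["code", "script", "debug", "function", "api",
--                                  "python", "javascript", "git", "deploy",
--                                  "refactor", "bug", "class", "module"]):
--         return [{"agent": "coder", "task": user_input}]
--
--     # Packing
--     if any(w in lower for w in ["pack", "packing list", "what to bring",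
--                                  "gear list", "carry-on", "luggage",
--                                  "what should i take"]):
--         return [{"agent": "packing_agent", "task": user_input}]
--
--     # Trip Planning
--     if any(w in lower for w in ["trip", "travel", "flight", "hotel", "itinerary",
--                                  "destination", "vacation", "road trip", "camping",
--                                  "route", "airbnb"]):
--         return [{"agent": "trip_planner", "task": user_input}]
--
--     # Writing
--     if any(w in lower for w in ["write", "draft", "email", "blog post", "edit",
--                                  "proofread", "polish", "letter", "document"]):
--         return [{"agent": "writer", "task": user_input}]
--
--     # Daily Brief
--     if any(w in lower for w in ["brief", "morning", "summary", "status update",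
--                                  "what's going on", "catch me up", "overview"]):
--         return [{"agent": "daily_brief", "task": user_input}]
--
--     # Research (general)
--     if any(w in lower for w in ["research", "compare", "evaluate", "benchmark",
--                                  "review", "analysis", "investigate",
--                                  "fact check", "specs"]):
--         return [{"agent": "research_analyst", "task": user_input}]
--
--     # Life Admin
--     if any(w in lower for w in ["remind", "todo", "to-do", "schedule",
--                                  "appointment", "errand", "task list",
--                                  "priority", "deadline"]):
--         return [{"agent": "life_admin", "task": user_input}]
--
--     # Memory Curator
--     if any(w in lower for w in ["improve", "self-improve", "optimize agents",
--                                  "consolidate memory", "agent performance",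
--                                  "tune prompts"]):
--         return [{"agent": "memory_curator", "task": user_input}]
--
--     return [{"agent": "coordinator", "task": user_input}]
-- ===== SOURCE B (Python) =====
-- _TABLE = [
--     ("eurovan_engineer", ["eurovan", "van", "engine", "gowesty", "suspension",
--                           "radiator", "subaru swap", "cv joint", "t4"]),
--     ("phd_researcher", ["dissertation", "thesis", "paper", "literature",
--                         "citation", "bibtex", "research gap", "related work",
--                         "reviewer"]),
--     ("autoresearch_trainer", ["autoresearch", "karpathy", "experiment",
--                               "training run", "hyperparameter", "fine-tune",
--                               "ablation", "loss curve", "epoch"]),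
--     ("coder", ["code", "script", "debug", "function", "api", "python",
--                "javascript", "git", "deploy", "refactor", "bug", "class",
--                "module"]),
--     ("packing_agent", ["pack", "packing list", "what to bring", "gear list",
--                        "carry-on", "luggage", "what should i take"]),
--     ("trip_planner", ["trip", "travel", "flight", "hotel", "itinerary",
--                       "destination", "vacation", "road trip", "camping",
--                       "route", "airbnb"]),
--     ("writer", ["write", "draft", "email", "blog post", "edit", "proofread",
--                 "polish", "letter", "document"]),
--     ("daily_brief", ["brief", "morning", "summary", "status update",
--                      "what's going on", "catch me up", "overview"]),
--     ("research_analyst", ["research", "compare", "evaluate", "benchmark",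
--                           "review", "analysis", "investigate", "fact check",
--                           "specs"]),
--     ("life_admin", ["remind", "todo", "to-do", "schedule", "appointment",
--                     "errand", "task list", "priority", "deadline"]),
--     ("memory_curator", ["improve", "self-improve", "optimize agents",
--                         "consolidate memory", "agent performance",
--                         "tune prompts"]),
-- ]
--
-- # One flat prioritised keyword index: (keyword, priority, agent) for every keyword.
-- _KEYWORDS = [(w, prio, agent)
--              for prio, (agent, words) in enumerate(_TABLE)
--              for w in words]
--
--
-- def _route_with_keywords(user_input: str) -> list[dict]:
--     """Keyword router: single flat pass taking the matching keyword of minimal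
--     category priority (argmin), instead of a short-circuiting category chain."""
--     lower = user_input.lower()
--     best_prio, best_agent = 11, "coordinator"
--     for w, prio, agent in _KEYWORDS:
--         if w in lower and prio < best_prio:
--             best_prio, best_agent = prio, agent
--     return [{"agent": best_agent, "task": user_input}]
-- ===== Notes on version B (the rewrite author's own statement) =====
-- stated objective: alternative
-- what changed: Replaced the short-circuiting chain of eleven if/return category blocks by a flat prioritised keyword index ((keyword, priority, agent) tuples) scanned once in an argmin pass that keeps the matching keyword with the smallest category priority; correct because the first category with a match is exactly the matching keyword of minimal priority.
import Mathlib
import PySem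

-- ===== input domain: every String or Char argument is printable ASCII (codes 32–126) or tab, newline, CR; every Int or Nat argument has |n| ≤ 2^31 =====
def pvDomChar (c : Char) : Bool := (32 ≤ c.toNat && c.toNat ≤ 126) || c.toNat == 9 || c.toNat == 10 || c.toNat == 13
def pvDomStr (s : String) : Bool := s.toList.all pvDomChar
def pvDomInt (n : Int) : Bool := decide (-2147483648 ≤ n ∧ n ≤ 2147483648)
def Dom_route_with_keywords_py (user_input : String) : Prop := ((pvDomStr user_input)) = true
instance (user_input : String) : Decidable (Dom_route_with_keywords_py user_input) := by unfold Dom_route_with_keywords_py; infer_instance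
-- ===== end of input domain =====

-- B replaces A's short-circuiting chain of eleven if/return blocks by one flat
-- prioritised keyword index scanned in a single argmin pass (alternative
-- decomposition, same cost). Return value only; no mutation.

-- ===== PORT A =====
-- literal transliteration: lower once, then a chain of `any`-guarded returns.
def route_with_keywords_py (user_input : String) : List (List (String × String)) :=
  let lower := PySem.Str.lower user_input
  if ["eurovan", "van", "engine", "gowesty", "suspension", "radiator",
      "subaru swap", "cv joint", "t4"].any (fun w => PySem.Str.isIn w lower) then
    [[("agent", "eurovan_engineer"), ("task", user_input)]]
  else if ["dissertation", "thesis", "paper", "literature", "citation", "bibtex",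
      "research gap", "related work", "reviewer"].any (fun w => PySem.Str.isIn w lower) then
    [[("agent", "phd_researcher"), ("task", user_input)]]
  else if ["autoresearch", "karpathy", "experiment", "training run", "hyperparameter",
      "fine-tune", "ablation", "loss curve", "epoch"].any (fun w => PySem.Str.isIn w lower) then
    [[("agent", "autoresearch_trainer"), ("task", user_input)]]
  else if ["code", "script", "debug", "function", "api", "python", "javascript",
      "git", "deploy", "refactor", "bug", "class", "module"].any (fun w => PySem.Str.isIn w lower) then
    [[("agent", "coder"), ("task", user_input)]]
  else if ["pack", "packing list", "what to bring", "gear list", "carry-on",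
      "luggage", "what should i take"].any (fun w => PySem.Str.isIn w lower) then
    [[("agent", "packing_agent"), ("task", user_input)]]
  else if ["trip", "travel", "flight", "hotel", "itinerary", "destination",
      "vacation", "road trip", "camping", "route", "airbnb"].any (fun w => PySem.Str.isIn w lower) then
    [[("agent", "trip_planner"), ("task", user_input)]]
  else if ["write", "draft", "email", "blog post", "edit", "proofread", "polish",
      "letter", "document"].any (fun w => PySem.Str.isIn w lower) then
    [[("agent", "writer"), ("task", user_input)]]
  else if ["brief", "morning", "summary", "status update", "what's going on",
      "catch me up", "overview"].any (fun w => PySem.Str.isIn w lower) then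
    [[("agent", "daily_brief"), ("task", user_input)]]
  else if ["research", "compare", "evaluate", "benchmark", "review", "analysis",
      "investigate", "fact check", "specs"].any (fun w => PySem.Str.isIn w lower) then
    [[("agent", "research_analyst"), ("task", user_input)]]
  else if ["remind", "todo", "to-do", "schedule", "appointment", "errand",
      "task list", "priority", "deadline"].any (fun w => PySem.Str.isIn w lower) then
    [[("agent", "life_admin"), ("task", user_input)]]
  else if ["improve", "self-improve", "optimize agents", "consolidate memory",
      "agent performance", "tune prompts"].any (fun w => PySem.Str.isIn w lower) then
    [[("agent", "memory_curator"), ("task", user_input)]]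
  else
    [[("agent", "coordinator"), ("task", user_input)]]

-- ===== PORT B =====
-- Source B's _TABLE
def pvTable : List (String × List String) :=
  [ ("eurovan_engineer", ["eurovan", "van", "engine", "gowesty", "suspension",
        "radiator", "subaru swap", "cv joint", "t4"]),
    ("phd_researcher", ["dissertation", "thesis", "paper", "literature",
        "citation", "bibtex", "research gap", "related work", "reviewer"]),
    ("autoresearch_trainer", ["autoresearch", "karpathy", "experiment",
        "training run", "hyperparameter", "fine-tune", "ablation", "loss curve",
        "epoch"]),
    ("coder", ["code", "script", "debug", "function", "api", "python",
        "javascript", "git", "deploy", "refactor", "bug", "class", "module"]),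
    ("packing_agent", ["pack", "packing list", "what to bring", "gear list",
        "carry-on", "luggage", "what should i take"]),
    ("trip_planner", ["trip", "travel", "flight", "hotel", "itinerary",
        "destination", "vacation", "road trip", "camping", "route", "airbnb"]),
    ("writer", ["write", "draft", "email", "blog post", "edit", "proofread",
        "polish", "letter", "document"]),
    ("daily_brief", ["brief", "morning", "summary", "status update",
        "what's going on", "catch me up", "overview"]),
    ("research_analyst", ["research", "compare", "evaluate", "benchmark",
        "review", "analysis", "investigate", "fact check", "specs"]),
    ("life_admin", ["remind", "todo", "to-do", "schedule", "appointment",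
        "errand", "task list", "priority", "deadline"]),
    ("memory_curator", ["improve", "self-improve", "optimize agents",
        "consolidate memory", "agent performance", "tune prompts"]) ]

-- Source B's _KEYWORDS comprehension: enumerate(_TABLE) flattened to (keyword, prio, agent)
def pvBuild (k : Int) (ts : List (String × List String)) : List (String × Int × String) :=
  match ts with
  | [] => []
  | (a, ws) :: rest => ws.map (fun w => (w, k, a)) ++ pvBuild (k + 1) rest

def pvKEYWORDS : List (String × Int × String) := pvBuild 0 pvTable

-- Source B's argmin loop over the flat keyword index
def route_with_keywords_py_alt (user_input : String) : List (List (String × String)) :=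
  let lower := PySem.Str.lower user_input
  let best := pvKEYWORDS.foldl
    (fun (b : Int × String) (e : String × Int × String) =>
      if PySem.Str.isIn e.1 lower && decide (e.2.1 < b.1) then (e.2.1, e.2.2) else b)
    ((11 : Int), "coordinator")
  [[("agent", best.2), ("task", user_input)]]

-- ===== PRECONDITION & SPEC =====
def Spec_route_with_keywords_py (user_input : String) (out : List (List (String × String))) : Prop := out = route_with_keywords_py_alt user_input
instance (user_input : String) (out : List (List (String × String))) : Decidable (Spec_route_with_keywords_py user_input out) := by unfold Spec_route_with_keywords_py; infer_instance

-- ===== CLAIM =====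
def Claim_equal_route_with_keywords_py : Prop := ∀ (user_input : String), Dom_route_with_keywords_py user_input → Spec_route_with_keywords_py user_input (route_with_keywords_py user_input)

-- ===== LEMMAS AND PROOFS =====

-- first matching category starting at priority k
def pvFirstIdx (m : String → Bool) (ts : List (String × List String)) (k : Int) :
    Option (Int × String) :=
  match ts with
  | [] => none
  | (a, ws) :: rest => if ws.any m then some (k, a) else pvFirstIdx m rest (k + 1)

-- one category's keywords: the fold updates (once) iff some keyword matches and
-- the category's priority beats the current best
theorem pvFoldCat (m : String → Bool) (ws : List String) (i : Int) (a : String)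
    (b : Int × String) :
    (ws.map (fun w => (w, i, a))).foldl
        (fun (b : Int × String) (e : String × Int × String) =>
          if m e.1 && decide (e.2.1 < b.1) then (e.2.1, e.2.2) else b) b
      = if ws.any m && decide (i < b.1) then (i, a) else b := by
  induction ws generalizing b with
  | nil => simp
  | cons w ws ih =>
    simp only [List.map_cons, List.foldl_cons, List.any_cons]
    cases hb : (m w && decide (i < b.1)) with
    | false =>
      rw [if_neg (by simp), ih b]
      rcases Bool.and_eq_false_iff.mp hb with h | h
      · simp [h]
      · simp [h]
    | true =>
      simp only [if_true]
      rw [ih]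
      have h1 := (Bool.and_eq_true _ _ |>.mp hb).1
      have h2 := of_decide_eq_true (Bool.and_eq_true _ _ |>.mp hb).2
      simp [h1, h2]

-- if the current best already beats every remaining priority, nothing changes
theorem pvNoUpdate (m : String → Bool) (ts : List (String × List String)) (k : Int)
    (b : Int × String) (h : b.1 ≤ k) :
    (pvBuild k ts).foldl
        (fun (b : Int × String) (e : String × Int × String) =>
          if m e.1 && decide (e.2.1 < b.1) then (e.2.1, e.2.2) else b) b = b := by
  induction ts generalizing k b with
  | nil => simp [pvBuild]
  | cons t rest ih =>
    obtain ⟨a, ws⟩ := t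
    simp only [pvBuild, List.foldl_append, pvFoldCat]
    have hk : decide (k < b.1) = false := by simp; omega
    rw [hk]
    simp only [Bool.and_false, Bool.false_eq_true, if_false]
    exact ih (k + 1) b (by omega)

-- the argmin fold over the flat index equals the first matching category
theorem pvMain (m : String → Bool) (ts : List (String × List String)) (k : Int)
    (b : Int × String) (h : k + ts.length ≤ b.1) :
    (pvBuild k ts).foldl
        (fun (b : Int × String) (e : String × Int × String) =>
          if m e.1 && decide (e.2.1 < b.1) then (e.2.1, e.2.2) else b) b
      = (pvFirstIdx m ts k).getD b := by
  induction ts generalizing k b with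
  | nil => simp [pvBuild, pvFirstIdx]
  | cons t rest ih =>
    obtain ⟨a, ws⟩ := t
    simp only [pvBuild, List.foldl_append, pvFoldCat, pvFirstIdx]
    have hk : decide (k < b.1) = true := by
      simp only [List.length_cons] at h; simp; push_cast at h; omega
    rw [hk]
    simp only [Bool.and_true]
    cases hw : ws.any m with
    | true =>
      simp only [if_true]
      rw [pvNoUpdate m rest (k + 1) (k, a) (by simp)]
      simp
    | false =>
      simp only [Bool.false_eq_true, if_false]
      refine ih (k + 1) b ?_
      simp only [List.length_cons] at h; push_cast at h ⊢; omega

-- A's if-chain as a function of the eleven category-match booleans equals the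
-- agent picked by the corresponding option chain (priorities irrelevant)
theorem pvChain (ui : String) (b1 b2 b3 b4 b5 b6 b7 b8 b9 b10 b11 : Bool)
    (i1 i2 i3 i4 i5 i6 i7 i8 i9 i10 i11 j : Int) :
    (if b1 = true then [[("agent", "eurovan_engineer"), ("task", ui)]] else if b2 = true then [[("agent", "phd_researcher"), ("task", ui)]] else if b3 = true then [[("agent", "autoresearch_trainer"), ("task", ui)]] else if b4 = true then [[("agent", "coder"), ("task", ui)]] else if b5 = true then [[("agent", "packing_agent"), ("task", ui)]] else if b6 = true then [[("agent", "trip_planner"), ("task", ui)]] else if b7 = true then [[("agent", "writer"), ("task", ui)]] else if b8 = true then [[("agent", "daily_brief"), ("task", ui)]] else if b9 = true then [[("agent", "research_analyst"), ("task", ui)]] else if b10 = true then [[("agent", "life_admin"), ("task", ui)]] else if b11 = true then [[("agent", "memory_curator"), ("task", ui)]] else [[("agent", "coordinator"), ("task", ui)]])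
    = [[("agent", ((if b1 = true then some (i1, "eurovan_engineer") else if b2 = true then some (i2, "phd_researcher") else if b3 = true then some (i3, "autoresearch_trainer") else if b4 = true then some (i4, "coder") else if b5 = true then some (i5, "packing_agent") else if b6 = true then some (i6, "trip_planner") else if b7 = true then some (i7, "writer") else if b8 = true then some (i8, "daily_brief") else if b9 = true then some (i9, "research_analyst") else if b10 = true then some (i10, "life_admin") else if b11 = true then some (i11, "memory_curator") else (none : Option (Int × String))).getD (j, "coordinator")).2), ("task", ui)]] := by
  cases b1 <;> cases b2 <;> cases b3 <;> cases b4 <;> cases b5 <;> cases b6 <;>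
    cases b7 <;> cases b8 <;> cases b9 <;> cases b10 <;> cases b11 <;> rfl

-- ===== VERDICT =====
theorem route_with_keywords_py_spec : Claim_equal_route_with_keywords_py := by
  intro ui _
  unfold Spec_route_with_keywords_py
  show route_with_keywords_py ui = route_with_keywords_py_alt ui
  simp only [route_with_keywords_py, route_with_keywords_py_alt, pvKEYWORDS]
  rw [pvMain (fun w => PySem.Str.isIn w (PySem.Str.lower ui)) pvTable 0
        ((11 : Int), "coordinator") (by simp [pvTable])]
  simp only [pvTable, pvFirstIdx]
  exact pvChain ui _ _ _ _ _ _ _ _ _ _ _ _ _ _ _ _ _ _ _ _ _ _ _
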